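-- pv_equiv track=rewrite | github.com/saudbadar/LeetCode-Answers | 401. Binary Watch/Solution.py | readBinaryWatch
-- ===== SOURCE A (Python) =====
-- from typing import List
--
-- def readBinaryWatch(turnedOn: int) -> List[str]:
--     res = []
--     if(turnedOn == [0,9,10]):
--         return(res)
--     for h in range(12):
--         for m in range(60):
--             if bin(h).count('1') + bin(m).count('1') == turnedOn:
--                 res.append(f"{h}:{m:02d}")
--     return res
-- ===== SOURCE B (Python) =====
-- from typing import List
--
-- def readBinaryWatch(turnedOn: int) -> List[str]:
--     minutes_by_count = {}
--     for m in range(60):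
--         minutes_by_count.setdefault(bin(m).count('1'), []).append(m)
--     res = []
--     for h in range(12):
--         needed = turnedOn - bin(h).count('1')
--         for m in minutes_by_count.get(needed, []):
--             res.append(f"{h}:{m:02d}")
--     return res
-- ===== Notes on version B (the rewrite author's own statement) =====
-- stated objective: alternative
-- what changed: Replaced the per-hour scan of every minute with a branch by a dict built once grouping minutes by popcount, so each hour walks only the minutes with exactly the needed bit count; the always-False comparison of the int argument against a list literal is dropped.
import Mathlib
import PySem

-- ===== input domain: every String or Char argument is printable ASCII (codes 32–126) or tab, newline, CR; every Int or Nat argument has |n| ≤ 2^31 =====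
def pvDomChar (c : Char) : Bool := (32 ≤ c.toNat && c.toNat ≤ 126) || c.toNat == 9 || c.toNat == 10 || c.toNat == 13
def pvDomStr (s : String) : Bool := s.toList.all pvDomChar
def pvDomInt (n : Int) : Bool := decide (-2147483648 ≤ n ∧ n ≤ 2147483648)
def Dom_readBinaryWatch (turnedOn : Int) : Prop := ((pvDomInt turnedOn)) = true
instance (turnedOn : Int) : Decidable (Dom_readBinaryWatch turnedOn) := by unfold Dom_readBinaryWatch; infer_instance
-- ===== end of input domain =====

-- B replaces A's per-hour scan of all 60 minutes by a popcount-indexed dict built once; same return value, different traversal.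

-- ===== PORT A =====
-- bin(x).count('1') as the Python writes it
def pvBinCount (x : Int) : Int := (PySem.Str.count (PySem.Int.pyBin x) "1" : Int)
-- f"{h}:{m:02d}" (m ≥ 0 here, so {m:02d} = str(m).zfill(2))
def pvFmt (h m : Int) : String :=
  String.ofList (PySem.Int.toChars h ++ ':' :: PySem.Chars.zfill (PySem.Int.toChars m) 2)

def readBinaryWatch (turnedOn : Int) : List String :=
  -- 'if turnedOn == [0,9,10]' compares an int with a list: always False in Python, so it is a no-op
  (PySem.List.pyRange 0 12 1).foldl (fun res h =>
    (PySem.List.pyRange 0 60 1).foldl (fun res m =>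
      if pvBinCount h + pvBinCount m = turnedOn then res ++ [pvFmt h m] else res)
      res) []

-- ===== PORT B =====
-- minutes_by_count: 'setdefault(k, []).append(m)' = store the old list (default []) extended by m,
-- keeping the key's position (Dict.insert overwrites in place / appends new keys, like setdefault)
def pvMinutesByCount : PySem.Dict Int (List Int) :=
  (PySem.List.pyRange 0 60 1).foldl (fun d m =>
    d.insert (pvBinCount m) (d.getD (pvBinCount m) [] ++ [m]))
    PySem.Dict.empty

def readBinaryWatch_alt (turnedOn : Int) : List String :=
  (PySem.List.pyRange 0 12 1).foldl (fun res h =>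
    res ++ (pvMinutesByCount.getD (turnedOn - pvBinCount h) []).map (fun m => pvFmt h m))
    []

-- ===== PRECONDITION & SPEC =====
def Spec_readBinaryWatch (turnedOn : Int) (out : List String) : Prop := out = readBinaryWatch_alt turnedOn
instance (turnedOn : Int) (out : List String) : Decidable (Spec_readBinaryWatch turnedOn out) := by unfold Spec_readBinaryWatch; infer_instance

-- ===== CLAIM (what is proved, stated in full; the proofs are below) =====
def Claim_equal_readBinaryWatch : Prop := ∀ (turnedOn : Int), Dom_readBinaryWatch turnedOn → Spec_readBinaryWatch turnedOn (readBinaryWatch turnedOn)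

-- ===== LEMMAS AND PROOFS =====

-- a fold whose body never changes the accumulator returns it unchanged
lemma foldl_fixed {α β : Type} (l : List α) (g : β → α → β) (acc : β)
    (h : ∀ r x, x ∈ l → g r x = r) : l.foldl g acc = acc := by
  induction l generalizing acc with
  | nil => rfl
  | cons a t ih =>
      simp only [List.foldl_cons]
      rw [h acc a (by simp), ih]
      intro r x hx; exact h r x (List.mem_cons_of_mem _ hx)

lemma binCount_hours : ∀ h ∈ PySem.List.pyRange 0 12 1, 0 ≤ pvBinCount h ∧ pvBinCount h ≤ 3 := by decide
lemma binCount_minutes : ∀ m ∈ PySem.List.pyRange 0 60 1, 0 ≤ pvBinCount m ∧ pvBinCount m ≤ 5 := by decide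

lemma A_empty (t : Int) (ht : t < 0 ∨ 8 < t) : readBinaryWatch t = [] := by
  unfold readBinaryWatch
  apply foldl_fixed
  intro r h hh
  apply foldl_fixed
  intro r' m hm
  have hb := binCount_hours h hh
  have hb' := binCount_minutes m hm
  rw [if_neg]
  omega

set_option maxRecDepth 8192 in
lemma minutesByCount_out (k : Int) (hk : k < 0 ∨ 5 < k) :
    pvMinutesByCount.getD k [] = [] := by
  apply PySem.Dict.getD_of_not_contains
  rw [PySem.Dict.contains_eq_decide_mem_keys]
  simp only [decide_eq_false_iff_not]
  intro hmem
  have hall : ∀ j ∈ pvMinutesByCount.keys, 0 ≤ j ∧ j ≤ 5 := by decide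
  have := hall k hmem
  omega

lemma B_empty (t : Int) (ht : t < 0 ∨ 8 < t) : readBinaryWatch_alt t = [] := by
  unfold readBinaryWatch_alt
  apply foldl_fixed
  intro r h hh
  have hb := binCount_hours h hh
  rw [minutesByCount_out _ (by omega)]
  simp

-- ===== VERDICT (by name: the statement is the Claim_ definition above) =====
set_option maxRecDepth 8192 in
theorem readBinaryWatch_spec : Claim_equal_readBinaryWatch := by
  intro t _
  unfold Spec_readBinaryWatch
  by_cases hlo : 0 ≤ t
  · by_cases hhi : t ≤ 8
    · interval_cases t <;> decide
    · rw [A_empty t (by omega), B_empty t (by omega)]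
  · rw [A_empty t (by omega), B_empty t (by omega)]
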